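-- pv_equiv track=rewrite | github.com/paiml/depyler | examples/hard_floyd_warshall.py | fw_init
-- ===== SOURCE A (Python) =====
-- def fw_init(n: int) -> list[int]:
--     """Initialize n x n distance matrix with infinity (999999999)."""
--     inf: int = 999999999
--     size: int = n * n
--     mat: list[int] = []
--     i: int = 0
--     while i < size:
--         mat.append(inf)
--         i = i + 1
--     j: int = 0
--     while j < n:
--         mat[j * n + j] = 0
--         j = j + 1
--     return mat
-- ===== SOURCE B (Python) =====
-- def fw_init(n: int) -> list[int]:
--     """Initialize n x n distance matrix with infinity (999999999)."""
--     inf: int = 999999999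
--     return [0 if i % (n + 1) == 0 else inf for i in range(n * n)]
-- ===== Notes on version B (the rewrite author's own statement) =====
-- stated objective: simpler
-- what changed: A fills n*n infinities and then overwrites the diagonal in a second loop; B computes every cell in one index-driven pass, using that a flat index is on the diagonal iff it is a multiple of n+1.
-- outside the precondition, e.g. on fw_init(-1): A returns [999999999], B raises ZeroDivisionError; on fw_init(-2): A returns [999999999, 999999999, 999999999, 999999999], B returns [0, 0, 0, 0]
import Mathlib
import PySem

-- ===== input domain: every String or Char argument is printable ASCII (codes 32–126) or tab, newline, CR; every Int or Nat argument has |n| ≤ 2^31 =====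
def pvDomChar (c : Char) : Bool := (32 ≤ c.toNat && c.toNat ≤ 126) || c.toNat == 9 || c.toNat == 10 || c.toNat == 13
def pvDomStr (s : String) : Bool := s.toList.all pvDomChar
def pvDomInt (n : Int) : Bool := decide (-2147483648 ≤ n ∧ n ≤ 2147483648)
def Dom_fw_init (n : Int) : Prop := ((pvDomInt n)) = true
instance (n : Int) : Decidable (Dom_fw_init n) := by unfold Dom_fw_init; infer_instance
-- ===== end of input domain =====

-- B replaces A's fill-then-overwrite pair of loops by one index-driven pass (diagonal ⟺ index divisible by n+1); objective: simpler.

-- ===== PORT A =====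
-- while i < size: mat.append(inf); i = i + 1
def fwFillA (size i : Int) (mat : List Int) : List Int :=
  if i < size then fwFillA size (i + 1) (mat ++ [999999999]) else mat
termination_by (size - i).toNat
decreasing_by omega

-- while j < n: mat[j * n + j] = 0; j = j + 1
def fwDiagA (n j : Int) (mat : List Int) : List Int :=
  if j < n then fwDiagA n (j + 1) (PySem.List.pySetD mat (j * n + j) 0) else mat
termination_by (n - j).toNat
decreasing_by omega

def fw_init (n : Int) : List Int :=
  let size : Int := n * n
  let mat : List Int := fwFillA size 0 []
  fwDiagA n 0 mat

-- ===== PORT B =====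
def fw_init_alt (n : Int) : List Int :=
  (PySem.List.pyRange 0 (n * n) 1).map
    (fun i => if PySem.Int.mod i (n + 1) = 0 then 0 else 999999999)

-- ===== PRECONDITION & SPEC =====
-- Pre_ excludes negative n, on which A still returns n*n infinities but B's modulus formula
-- raises ZeroDivisionError (n = -1) or treats every cell as diagonal (n ≤ -2); n ≥ 0 is the
-- function's natural domain (a matrix dimension).
def Pre_fw_init (n : Int) : Prop := 0 ≤ n
instance (n : Int) : Decidable (Pre_fw_init n) := by unfold Pre_fw_init; infer_instance
def pvWitness_fw_init : Int := (3)

def Spec_fw_init (n : Int) (out : List Int) : Prop := out = fw_init_alt n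
instance (n : Int) (out : List Int) : Decidable (Spec_fw_init n out) := by unfold Spec_fw_init; infer_instance

-- ===== CLAIM (what is proved, stated in full; the proofs are below) =====
def Claim_equal_fw_init : Prop := ∀ (n : Int), Dom_fw_init n → Pre_fw_init n → Spec_fw_init n (fw_init n)

-- ===== LEMMAS AND PROOFS =====

-- A's first loop appends (size - i) infinities.
theorem fwFillA_eq (size i : Int) (mat : List Int) :
    fwFillA size i mat = mat ++ List.replicate (size - i).toNat 999999999 := by
  by_cases h : i < size
  · rw [fwFillA, if_pos h, fwFillA_eq size (i + 1)]
    have : (size - i).toNat = (size - (i + 1)).toNat + 1 := by omega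
    rw [this, List.replicate_succ, List.append_assoc]
    rfl
  · rw [fwFillA, if_neg h]
    have : (size - i).toNat = 0 := by omega
    simp [this]
termination_by (size - i).toNat
decreasing_by omega

theorem fwDiagA_length (n j : Int) (mat : List Int) :
    (fwDiagA n j mat).length = mat.length := by
  by_cases h : j < n
  · rw [fwDiagA, if_pos h, fwDiagA_length, PySem.List.length_pySetD]
  · rw [fwDiagA, if_neg h]
termination_by (n - j).toNat
decreasing_by omega

-- Element-wise effect of A's diagonal loop: cell k becomes 0 iff k is a multiple of n+1
-- not below j*(n+1); other cells keep their value.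
theorem fwDiagA_getElem? (n j : Int) (hn : 0 ≤ n) (hj : 0 ≤ j) (mat : List Int)
    (hlen : (mat.length : Int) = n * n) (k : Nat) (hk : k < mat.length) :
    (fwDiagA n j mat)[k]? =
      if (k : Int) % (n + 1) = 0 ∧ j * (n + 1) ≤ (k : Int) then some 0 else mat[k]? := by
  by_cases h : j < n
  · rw [fwDiagA, if_pos h]
    have hidx : (0 : Int) ≤ j * n + j := by positivity
    have hidxlt : j * n + j < (mat.length : Int) := by nlinarith
    have hset : PySem.List.pySetD mat (j * n + j) 0 = mat.set (j * n + j).toNat 0 :=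
      PySem.List.pySetD_of_nonneg mat 0 hidx
    have hlen' : ((PySem.List.pySetD mat (j * n + j) 0).length : Int) = n * n := by
      rw [PySem.List.length_pySetD]; exact hlen
    have hk' : k < (PySem.List.pySetD mat (j * n + j) 0).length := by
      rw [PySem.List.length_pySetD]; exact hk
    rw [fwDiagA_getElem? n (j + 1) hn (by omega) _ hlen' k hk', hset]
    by_cases hkeq : (k : Int) = j * n + j
    · -- k is exactly the cell set in this step
      have hmod : (k : Int) % (n + 1) = 0 := by
        rw [hkeq, show j * n + j = j * (n + 1) by ring]; exact Int.mul_emod_left _ _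
      have hknat : k = (j * n + j).toNat := by omega
      have hset_get : (mat.set (j * n + j).toNat 0)[k]? = some 0 := by
        rw [hknat, List.getElem?_set_self (by omega)]
      by_cases hge : (j + 1) * (n + 1) ≤ (k : Int)
      · rw [if_pos ⟨hmod, hge⟩, if_pos ⟨hmod, by nlinarith⟩]
      · rw [if_neg (by tauto), hset_get, if_pos ⟨hmod, by rw [hkeq]; nlinarith⟩]
    · -- a different cell: untouched by this step
      have hset_get : (mat.set (j * n + j).toNat 0)[k]? = mat[k]? := by
        apply List.getElem?_set_ne
        omega
      rw [hset_get]
      congr 1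
      -- the two range conditions agree off the cell j*(n+1)
      apply propext
      constructor
      · rintro ⟨hm, hge⟩; exact ⟨hm, by nlinarith⟩
      · rintro ⟨hm, hge⟩
        refine ⟨hm, ?_⟩
        obtain ⟨c, hc⟩ := Int.dvd_of_emod_eq_zero hm
        have hpos : (0 : Int) < n + 1 := by omega
        have hjc : j ≤ c := by
          by_contra hlt
          push Not at hlt
          nlinarith
        have hne : c ≠ j := by
          intro hcj
          apply hkeq
          rw [hc, hcj]; ring
        have hjc1 : j + 1 ≤ c := by omega
        rw [hc]
        nlinarith
  · rw [fwDiagA, if_neg h]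
    rw [if_neg]
    rintro ⟨hm, hge⟩
    have hjn : n ≤ j := by omega
    have : n * (n + 1) ≤ j * (n + 1) := by
      apply mul_le_mul_of_nonneg_right hjn (by omega)
    have hklt : (k : Int) < n * n := by omega
    nlinarith
termination_by (n - j).toNat
decreasing_by omega

-- ===== VERDICT (by name: the statement is the Claim_ definition above) =====
theorem fw_init_spec : Claim_equal_fw_init := by
  intro n _ hn
  have hn0 : (0 : Int) ≤ n := hn
  unfold Spec_fw_init fw_init fw_init_alt
  simp only
  rw [fwFillA_eq, PySem.List.pyRange_one]
  simp only [List.nil_append]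
  have hnn : (0 : Int) ≤ n * n := mul_nonneg hn0 hn0
  have hlenrep : ((List.replicate (n * n - 0).toNat (999999999 : Int)).length : Int) = n * n := by
    simp only [List.length_replicate]; omega
  apply List.ext_getElem?
  intro k
  by_cases hk : k < (n * n - 0).toNat
  · rw [fwDiagA_getElem? n 0 hn0 le_rfl _ hlenrep k (by simpa using hk)]
    rw [List.getElem?_map, List.getElem?_map, List.getElem?_range hk]
    simp only [Option.map_some]
    have hmod : PySem.Int.mod ((0 : Int) + (k : Int)) (n + 1) = (k : Int) % (n + 1) := by
      rw [PySem.Int.mod_eq_emod_of_pos (by omega)]; ring_nf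
    rw [hmod]
    by_cases hc : (k : Int) % (n + 1) = 0
    · rw [if_pos ⟨hc, by simp only [zero_mul]; exact Int.natCast_nonneg k⟩, if_pos hc]
    · rw [if_neg (by tauto), if_neg hc, List.getElem?_replicate, if_pos hk]
  · rw [List.getElem?_eq_none, List.getElem?_eq_none]
    · simp only [List.length_map, List.length_range]; omega
    · rw [fwDiagA_length]; simp only [List.length_replicate]; omega
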